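-- pv_equiv track=rewrite | github.com/wuhaotian0508/biojson | src/crispr/gene2accession.py | _pick_best_accession
-- ===== SOURCE A (Python) =====
-- def _pick_best_accession(records: list[dict], gene_name: str) -> str:
--     if not records:
--         return ""
--     gene_name_lower = gene_name.lower()
--     exact_gene = [record for record in records if gene_name_lower in record.get("title", "").lower()]
--     if exact_gene:
--         transcript_like = [
--             record
--             for record in exact_gene
--             if any(key in record.get("title", "").lower() for key in ("mrna", "cdna", "transcript"))
--         ]
--         return (transcript_like[0] if transcript_like else exact_gene[0]).get("accession", "")
--     transcript_like = [
--         record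
--         for record in records
--         if any(key in record.get("title", "").lower() for key in ("mrna", "cdna", "transcript"))
--     ]
--     return (transcript_like[0] if transcript_like else records[0]).get("accession", "")
-- ===== SOURCE B (Python) =====
-- def _pick_best_accession(records: list[dict], gene_name: str) -> str:
--     gl = gene_name.lower()
--     best, best_score = None, -1
--     for record in records:
--         title = record.get("title", "").lower()
--         score = (2 if gl in title else 0) + (
--             1 if any(key in title for key in ("mrna", "cdna", "transcript")) else 0
--         )
--         if best_score < score:
--             best, best_score = record, score
--     if best is None:
--         return ""
--     return best.get("accession", "")
-- ===== Notes on version B (the rewrite author's own statement) =====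
-- stated objective: simpler
-- what changed: Replaced the two-phase filter cascade (filter by gene-name match, then filter for transcript keywords, with a fallback cascade of list heads) by a single pass that scores each record (2 for gene-name match + 1 for a transcript keyword) and keeps the first record attaining the maximum score via strict-greater replacement.
import Mathlib
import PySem

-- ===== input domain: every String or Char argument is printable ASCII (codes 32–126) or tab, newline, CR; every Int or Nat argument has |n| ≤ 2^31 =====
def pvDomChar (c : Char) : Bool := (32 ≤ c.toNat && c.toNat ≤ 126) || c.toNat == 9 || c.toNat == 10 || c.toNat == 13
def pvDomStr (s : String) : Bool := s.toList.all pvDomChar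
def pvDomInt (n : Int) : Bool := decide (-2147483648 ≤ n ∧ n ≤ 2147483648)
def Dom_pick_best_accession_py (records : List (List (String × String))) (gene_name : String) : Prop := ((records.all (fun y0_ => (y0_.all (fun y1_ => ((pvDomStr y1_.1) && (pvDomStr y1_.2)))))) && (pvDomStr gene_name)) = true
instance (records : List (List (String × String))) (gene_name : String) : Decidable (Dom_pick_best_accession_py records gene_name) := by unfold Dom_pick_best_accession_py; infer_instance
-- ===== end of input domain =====

-- B replaces A's two-phase filter cascade by a single scoring pass (first record with
-- the maximum score wins); objective: simpler.

-- ===== PORT A =====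
-- record.get(key, default) on an association list (dict: first match)
def pvA_get (record : List (String × String)) (key dflt : String) : String :=
  match record.find? (fun kv => kv.1 == key) with
  | some kv => kv.2
  | none => dflt

def pick_best_accession_py (records : List (List (String × String))) (gene_name : String) : String :=
  if records.isEmpty then ""
  else
    let gene_name_lower := PySem.Str.lower gene_name
    let exact_gene := records.filter (fun record =>
      PySem.Str.isIn gene_name_lower (PySem.Str.lower (pvA_get record "title" "")))
    if !exact_gene.isEmpty then
      let transcript_like := exact_gene.filter (fun record =>
        ["mrna", "cdna", "transcript"].any (fun key =>
          PySem.Str.isIn key (PySem.Str.lower (pvA_get record "title" ""))))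
      pvA_get ((if !transcript_like.isEmpty then transcript_like else exact_gene).headD []) "accession" ""
    else
      let transcript_like := records.filter (fun record =>
        ["mrna", "cdna", "transcript"].any (fun key =>
          PySem.Str.isIn key (PySem.Str.lower (pvA_get record "title" ""))))
      pvA_get ((if !transcript_like.isEmpty then transcript_like else records).headD []) "accession" ""

-- ===== PORT B =====
-- record.get(key, default) on an association list (dict: first match)
def pvB_get (record : List (String × String)) (key dflt : String) : String :=
  match record.find? (fun kv => kv.1 == key) with
  | some kv => kv.2
  | none => dflt

-- priority score of one record: 2 for a gene-name match + 1 for a transcript keyword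
def pvB_score (gl : String) (record : List (String × String)) : Int :=
  let title := PySem.Str.lower (pvB_get record "title" "")
  (if PySem.Str.isIn gl title then 2 else 0) +
    (if ["mrna", "cdna", "transcript"].any (fun key => PySem.Str.isIn key title) then 1 else 0)

def pick_best_accession_py_alt (records : List (List (String × String))) (gene_name : String) : String :=
  let gl := PySem.Str.lower gene_name
  let best := records.foldl
    (fun (acc : Option (List (String × String)) × Int) record =>
      let score := pvB_score gl record
      if acc.2 < score then (some record, score) else acc)
    (none, -1)
  match best.1 with
  | none => ""
  | some b => pvB_get b "accession" ""

-- ===== PRECONDITION & SPEC =====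
def Spec_pick_best_accession_py (records : List (List (String × String))) (gene_name : String) (out : String) : Prop := out = pick_best_accession_py_alt records gene_name
instance (records : List (List (String × String))) (gene_name : String) (out : String) : Decidable (Spec_pick_best_accession_py records gene_name out) := by unfold Spec_pick_best_accession_py; infer_instance

-- ===== CLAIM (what is proved, stated in full; the proofs are below) =====
def Claim_equal_pick_best_accession_py : Prop := ∀ (records : List (List (String × String))) (gene_name : String), Dom_pick_best_accession_py records gene_name → Spec_pick_best_accession_py records gene_name (pick_best_accession_py records gene_name)

-- ===== LEMMAS AND PROOFS =====

-- the two atomic predicates, shared by the analysis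
def pvGene (gl : String) (record : List (String × String)) : Bool :=
  PySem.Str.isIn gl (PySem.Str.lower (pvB_get record "title" ""))

def pvTrans (record : List (String × String)) : Bool :=
  ["mrna", "cdna", "transcript"].any (fun key =>
    PySem.Str.isIn key (PySem.Str.lower (pvB_get record "title" "")))

theorem pvB_score_eq (gl : String) (r : List (String × String)) :
    pvB_score gl r = (if pvGene gl r then 2 else 0) + (if pvTrans r then 1 else 0) := rfl

theorem pvB_score_nonneg (gl : String) (r : List (String × String)) : 0 ≤ pvB_score gl r := by
  rw [pvB_score_eq]; split <;> split <;> omega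

theorem pvB_score_le_three (gl : String) (r : List (String × String)) : pvB_score gl r ≤ 3 := by
  rw [pvB_score_eq]; split <;> split <;> omega

-- max score of a list (-1 for [])
def pvMax (gl : String) : List (List (String × String)) → Int
  | [] => -1
  | r :: rs => max (pvB_score gl r) (pvMax gl rs)

theorem pvMax_le (gl : String) (l : List (List (String × String))) (r) (h : r ∈ l) :
    pvB_score gl r ≤ pvMax gl l := by
  induction l with
  | nil => cases h
  | cons a t ih =>
    rcases List.mem_cons.mp h with h | h
    · subst h; simp [pvMax]
    · simp [pvMax]; right; exact ih h

theorem pvMax_mem (gl : String) (l : List (List (String × String))) (h : l ≠ []) :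
    ∃ r ∈ l, pvB_score gl r = pvMax gl l := by
  induction l with
  | nil => exact absurd rfl h
  | cons a t ih =>
    by_cases ht : t = []
    · subst ht
      exact ⟨a, by simp, by have := pvB_score_nonneg gl a; simp [pvMax]; omega⟩
    · rcases ih ht with ⟨r, hr, hs⟩
      by_cases hle : pvMax gl t ≤ pvB_score gl a
      · exact ⟨a, by simp, by simp [pvMax]; omega⟩
      · exact ⟨r, by simp [hr], by simp [pvMax]; omega⟩

-- the strict-improvement selector (the essence of B's fold)
def pvPick (gl : String) (b : List (String × String)) :
    List (List (String × String)) → List (String × String)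
  | [] => b
  | r :: rs => if pvB_score gl b < pvB_score gl r then pvPick gl r rs else pvPick gl b rs

theorem pvPick_char (gl : String) (l : List (List (String × String))) :
    ∀ b, pvPick gl b l =
      if pvMax gl l ≤ pvB_score gl b then b
      else (l.find? (fun r => pvB_score gl r == pvMax gl l)).getD b := by
  induction l with
  | nil =>
    intro b
    rw [pvPick, if_pos (show pvMax gl [] ≤ pvB_score gl b from by
      have := pvB_score_nonneg gl b
      simp only [pvMax]; omega)]
  | cons a t ih =>
    intro b
    have hmax : pvMax gl (a :: t) = max (pvB_score gl a) (pvMax gl t) := rfl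
    by_cases hlt : pvB_score gl b < pvB_score gl a
    · rw [pvPick, if_pos hlt, ih a]
      by_cases h2 : pvMax gl t ≤ pvB_score gl a
      · have : pvMax gl (a :: t) = pvB_score gl a := by rw [hmax]; omega
        rw [if_pos h2, if_neg (by omega), List.find?]
        simp [this]
      · have hne : t ≠ [] := by
          intro h; subst h; simp [pvMax] at h2; have := pvB_score_nonneg gl a; omega
        have : pvMax gl (a :: t) = pvMax gl t := by rw [hmax]; omega
        rw [if_neg h2, if_neg (by omega), List.find?]
        have hna : (pvB_score gl a == pvMax gl (a :: t)) = false := by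
          simp [this]; omega
        rw [hna, this]
        rcases pvMax_mem gl t hne with ⟨r, hr, hs⟩
        have hsome : (t.find? (fun r => pvB_score gl r == pvMax gl t)).isSome := by
          rw [List.find?_isSome]; exact ⟨r, hr, by simp [hs]⟩
        rcases Option.isSome_iff_exists.mp hsome with ⟨x, hx⟩
        simp [hx]
    · rw [pvPick, if_neg hlt, ih b]
      by_cases h2 : pvMax gl t ≤ pvB_score gl b
      · rw [if_pos h2, if_pos (by omega)]
      · have : pvMax gl (a :: t) = pvMax gl t := by rw [hmax]; omega
        rw [if_neg h2, if_neg (by omega), List.find?]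
        have hna : (pvB_score gl a == pvMax gl (a :: t)) = false := by
          simp [this]; omega
        rw [hna, this]

-- B's pair-valued fold computes pvPick
theorem pvFold_eq_pvPick (gl : String) (l : List (List (String × String))) :
    ∀ b, l.foldl
      (fun (acc : Option (List (String × String)) × Int) record =>
        if acc.2 < pvB_score gl record then (some record, pvB_score gl record) else acc)
      (some b, pvB_score gl b)
      = (some (pvPick gl b l), pvB_score gl (pvPick gl b l)) := by
  induction l with
  | nil => intro b; simp [pvPick]
  | cons a t ih =>
    intro b
    rw [List.foldl_cons, pvPick]
    by_cases h : pvB_score gl b < pvB_score gl a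
    · simp only [if_pos h]; exact ih a
    · simp only [if_neg h]; exact ih b

-- B on a nonempty list = accession of pvPick of head over tail
theorem alt_eq_pick (records : List (List (String × String))) (gene_name : String)
    (hd : List (String × String)) (tl : List (List (String × String)))
    (h : records = hd :: tl) :
    pick_best_accession_py_alt records gene_name =
      pvB_get (pvPick (PySem.Str.lower gene_name) hd tl) "accession" "" := by
  subst h
  unfold pick_best_accession_py_alt
  simp only [List.foldl_cons]
  have h0 : (-1 : Int) < pvB_score (PySem.Str.lower gene_name) hd := by
    have := pvB_score_nonneg (PySem.Str.lower gene_name) hd; omega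
  rw [if_pos (by simpa using h0), pvFold_eq_pvPick]

-- find? congruence
theorem find?_congr' {α : Type} (l : List α) (p q : α → Bool)
    (h : ∀ x ∈ l, p x = q x) : l.find? p = l.find? q := by
  induction l with
  | nil => rfl
  | cons a t ih =>
    simp only [List.find?]; rw [h a (by simp)]
    split
    · rfl
    · exact ih (fun x hx => h x (by simp [hx]))

-- scores decode back into the two predicates
theorem score_eq_three (gl : String) (r : List (String × String)) :
    (pvB_score gl r == 3) = (pvGene gl r && pvTrans r) := by
  rw [pvB_score_eq]; cases hg : pvGene gl r <;> cases ht : pvTrans r <;> simp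

theorem score_eq_two (gl : String) (r : List (String × String)) :
    (pvB_score gl r == 2) = (pvGene gl r && !pvTrans r) := by
  rw [pvB_score_eq]; cases hg : pvGene gl r <;> cases ht : pvTrans r <;> simp

theorem score_eq_one (gl : String) (r : List (String × String)) :
    (pvB_score gl r == 1) = (!pvGene gl r && pvTrans r) := by
  rw [pvB_score_eq]; cases hg : pvGene gl r <;> cases ht : pvTrans r <;> simp

theorem score_eq_zero (gl : String) (r : List (String × String)) :
    (pvB_score gl r == 0) = (!pvGene gl r && !pvTrans r) := by
  rw [pvB_score_eq]; cases hg : pvGene gl r <;> cases ht : pvTrans r <;> simp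

-- pvPick over (hd :: tl) = first element of the whole list attaining the max
theorem pvPick_eq_findmax (gl : String) (hd : List (String × String))
    (tl : List (List (String × String))) :
    pvPick gl hd tl =
      ((hd :: tl).find? (fun r => pvB_score gl r == pvMax gl (hd :: tl))).getD [] := by
  rw [pvPick_char]
  have hmax : pvMax gl (hd :: tl) = max (pvB_score gl hd) (pvMax gl tl) := rfl
  by_cases h : pvMax gl tl ≤ pvB_score gl hd
  · have : pvMax gl (hd :: tl) = pvB_score gl hd := by rw [hmax]; omega
    rw [if_pos h, List.find?]
    simp [this]
  · have hne : tl ≠ [] := by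
      intro hh; subst hh; simp [pvMax] at h; have := pvB_score_nonneg gl hd; omega
    have heq : pvMax gl (hd :: tl) = pvMax gl tl := by rw [hmax]; omega
    rw [if_neg h, List.find?]
    have hna : (pvB_score gl hd == pvMax gl (hd :: tl)) = false := by
      simp [heq]; omega
    rw [hna, heq]
    rcases pvMax_mem gl tl hne with ⟨r, hr, hs⟩
    have hsome : (tl.find? (fun r => pvB_score gl r == pvMax gl tl)).isSome := by
      rw [List.find?_isSome]; exact ⟨r, hr, by simp [hs]⟩
    rcases Option.isSome_iff_exists.mp hsome with ⟨x, hx⟩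
    simp [hx]

-- ===== VERDICT (by name: the statement is the Claim_ definition above) =====
set_option maxHeartbeats 1000000 in
theorem pick_best_accession_py_spec : Claim_equal_pick_best_accession_py := by
  intro records gene_name _
  unfold Spec_pick_best_accession_py
  cases records with
  | nil => rfl
  | cons hd tl =>
  rw [alt_eq_pick (hd :: tl) gene_name hd tl rfl, pvPick_eq_findmax]
  unfold pick_best_accession_py
  rw [if_neg (by simp)]
  have hAget : pvA_get = pvB_get := rfl
  simp only [hAget]
  rw [show (fun record => PySem.Str.isIn (PySem.Str.lower gene_name)
        (PySem.Str.lower (pvB_get record "title" ""))) =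
      (fun r => pvGene (PySem.Str.lower gene_name) r) from rfl]
  rw [show (fun record => ["mrna", "cdna", "transcript"].any (fun key =>
        PySem.Str.isIn key (PySem.Str.lower (pvB_get record "title" "")))) =
      (fun r => pvTrans r) from rfl]
  set gl := PySem.Str.lower gene_name with hgl
  set l := hd :: tl with hl
  have hM3 : ∀ r ∈ l, pvB_score gl r ≤ pvMax gl l := pvMax_le gl l
  rcases pvMax_mem gl l (by simp [hl]) with ⟨w, hwmem, hwscore⟩
  by_cases hEx : l.filter (fun r => pvGene gl r) = []
  · -- no record matches the gene name
    have hng : ∀ r ∈ l, pvGene gl r = false := by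
      intro r hr
      by_contra hc
      exact absurd (List.mem_filter.mpr ⟨hr, by simpa using hc⟩) (by simp [hEx])
    rw [if_neg (by simp [hEx])]
    by_cases hTr : l.filter (fun r => pvTrans r) = []
    · -- nothing transcript-like either: max = 0, B picks the head
      have hnt : ∀ r ∈ l, pvTrans r = false := by
        intro r hr
        by_contra hc
        exact absurd (List.mem_filter.mpr ⟨hr, by simpa using hc⟩) (by simp [hTr])
      have hM : pvMax gl l = 0 := by
        rw [← hwscore, pvB_score_eq, hng w hwmem, hnt w hwmem]; simp
      rw [if_neg (by simp [hTr])]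
      have hfind : l.find? (fun r => pvB_score gl r == pvMax gl l) = some hd := by
        rw [hl, List.find?]
        have hc : (pvB_score gl hd == pvMax gl l) = true := by
          rw [hM, score_eq_zero, hng hd (by simp [hl]), hnt hd (by simp [hl])]; rfl
        rw [hc]
      rw [hfind, hl]
      rfl
    · -- transcript-like exists, no gene match: max = 1, first transcript-like wins
      have hM : pvMax gl l = 1 := by
        rcases List.exists_mem_of_ne_nil _ hTr with ⟨r, hr⟩
        rcases List.mem_filter.mp hr with ⟨hrl, hrt⟩
        have h1 : pvB_score gl r = 1 := by
          rw [pvB_score_eq, hng r hrl, hrt]; rfl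
        have hle : pvB_score gl r ≤ pvMax gl l := hM3 r hrl
        have hup : pvMax gl l ≤ 1 := by
          rw [← hwscore, pvB_score_eq, hng w hwmem]
          cases ht : pvTrans w <;> simp
        omega
      rw [if_pos (by simp [hTr])]
      have hfind : l.find? (fun r => pvB_score gl r == pvMax gl l)
          = l.find? (fun r => pvTrans r) := by
        apply find?_congr'
        intro r hr
        rw [hM, score_eq_one, hng r hr]
        simp
      rw [List.headD_eq_head?, List.head?_filter, ← hfind]
  · -- some record matches the gene name
    rcases List.exists_mem_of_ne_nil _ hEx with ⟨e, he⟩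
    rcases List.mem_filter.mp he with ⟨hel, heg⟩
    rw [if_pos (by simp [hEx])]
    rw [List.filter_filter]
    by_cases hTr : l.filter (fun r => pvTrans r && pvGene gl r) = []
    · -- gene matches but none transcript-like: max = 2, first gene match wins
      have hn3 : ∀ r ∈ l, (pvTrans r && pvGene gl r) = false := by
        intro r hr
        cases hv : (pvTrans r && pvGene gl r)
        · rfl
        · exact absurd (show r ∈ List.filter (fun r => pvTrans r && pvGene gl r) l from
              List.mem_filter.mpr ⟨hr, hv⟩) (by simp [hTr])
      have hM : pvMax gl l = 2 := by
        have he2 : pvB_score gl e = 2 := by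
          have het : pvTrans e = false := by
            have := hn3 e hel
            cases ht : pvTrans e
            · rfl
            · rw [ht, heg] at this; simp at this
          rw [pvB_score_eq, heg, het]; rfl
        have hle : pvB_score gl e ≤ pvMax gl l := hM3 e hel
        have hup : pvMax gl l ≤ 2 := by
          rw [← hwscore, pvB_score_eq]
          have := hn3 w hwmem
          cases hg : pvGene gl w <;> cases ht : pvTrans w <;> simp_all
        omega
      rw [if_neg (by simp [hTr])]
      have hfind : l.find? (fun r => pvB_score gl r == pvMax gl l)
          = l.find? (fun r => pvGene gl r) := by
        apply find?_congr'
        intro r hr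
        rw [hM, score_eq_two]
        have := hn3 r hr
        cases hg : pvGene gl r <;> cases ht : pvTrans r <;> simp_all
      rw [List.headD_eq_head?, List.head?_filter, ← hfind]
    · -- a gene-matching transcript-like record exists: max = 3, it wins
      have hM : pvMax gl l = 3 := by
        rcases List.exists_mem_of_ne_nil _ hTr with ⟨r, hr⟩
        rcases List.mem_filter.mp hr with ⟨hrl, hrp⟩
        have h3 : pvB_score gl r = 3 := by
          rcases Bool.and_eq_true_iff.mp hrp with ⟨ht, hg⟩
          rw [pvB_score_eq, ht, hg]; rfl
        have hle : pvB_score gl r ≤ pvMax gl l := hM3 r hrl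
        have hup : pvMax gl l ≤ 3 := hwscore ▸ pvB_score_le_three gl w
        omega
      rw [if_pos (by simp [hTr])]
      have hfind : l.find? (fun r => pvB_score gl r == pvMax gl l)
          = l.find? (fun r => pvTrans r && pvGene gl r) := by
        apply find?_congr'
        intro r hr
        rw [hM, score_eq_three]
        cases hg : pvGene gl r <;> cases ht : pvTrans r <;> simp
      rw [List.headD_eq_head?, List.head?_filter, ← hfind]
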